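-- pv_equiv track=rewrite | github.com/jooonyong/2021-2-Algorithm-Homework | assignment1/recursion.py | Array_algorithm
-- ===== SOURCE A (Python) =====
-- def Array_algorithm(n):
--     array = []
--     array.append(1)
--     array.append(1)
--
--     sum = 2
--     for i in range(2,n):
--         array.append(sum)
--         sum += array[i]
--
--     return array[n-1]
-- ===== SOURCE B (Python) =====
-- def Array_algorithm(n):
--     # Closed form: the doubling loop produces powers of two, so array[n-1] = 2**(n-2) for n >= 3, else 1.
--     return 1 if n < 3 else 1 << (n - 2)
-- ===== Notes on version B (the rewrite author's own statement) =====
-- stated objective: faster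
-- what changed: Replaced the loop that builds the whole doubling array with the closed form 1<<(n-2) (1 for n<3).
-- outside the precondition, e.g. on Array_algorithm(-2): A raises IndexError, B returns 1
import Mathlib
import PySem

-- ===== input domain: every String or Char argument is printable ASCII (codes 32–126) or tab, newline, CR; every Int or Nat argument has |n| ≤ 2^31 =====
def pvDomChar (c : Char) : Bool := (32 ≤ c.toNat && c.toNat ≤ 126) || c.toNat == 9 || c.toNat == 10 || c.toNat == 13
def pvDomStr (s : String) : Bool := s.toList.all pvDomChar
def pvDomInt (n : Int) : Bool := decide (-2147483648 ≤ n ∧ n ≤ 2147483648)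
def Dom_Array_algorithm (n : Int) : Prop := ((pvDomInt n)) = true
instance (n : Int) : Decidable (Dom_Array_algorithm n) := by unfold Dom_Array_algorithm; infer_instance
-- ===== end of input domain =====

-- ===== PORT A =====
-- B replaces A's array-building loop with the closed form 1 << (n-2); objective: faster.
-- A raises IndexError for n <= -2 (final array[n-1] out of range); Pre_ excludes those inputs.
-- One loop step of A: append sum, then sum += array[i].  The in-loop index i is always in
-- range (array has i+1 elements there), so '.getD 0' is exact; the final array[n-1] is in
-- range under Pre_.
def aStep (st : List Int × Int) (i : Int) : List Int × Int :=
  let array := st.1 ++ [st.2]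
  (array, st.2 + (PySem.List.pyGet? array i).getD 0)

def Array_algorithm (n : Int) : Int :=
  let st := (PySem.List.pyRange 2 n 1).foldl aStep ([1, 1], 2)
  (PySem.List.pyGet? st.1 (n - 1)).getD 0

-- ===== PORT B =====
def Array_algorithm_alt (n : Int) : Int :=
  if n < 3 then 1 else 2 ^ (n - 2).toNat  -- 1 << (n - 2)

-- ===== PRECONDITION & SPEC =====
-- A raises IndexError for n <= -2 (array[n-1] with the list still of length 2); excluded.
def Pre_Array_algorithm (n : Int) : Prop := -1 ≤ n
instance (n : Int) : Decidable (Pre_Array_algorithm n) := by unfold Pre_Array_algorithm; infer_instance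
def pvWitness_Array_algorithm : Int := 5

def Spec_Array_algorithm (n : Int) (out : Int) : Prop := out = Array_algorithm_alt n
instance (n : Int) (out : Int) : Decidable (Spec_Array_algorithm n out) := by unfold Spec_Array_algorithm; infer_instance

-- ===== CLAIM (what is proved, stated in full; the proofs are below) =====
def Claim_equal_Array_algorithm : Prop := ∀ (n : Int), Dom_Array_algorithm n → Pre_Array_algorithm n → Spec_Array_algorithm n (Array_algorithm n)

-- ===== LEMMAS AND PROOFS =====

-- State of A's loop after processing range(2, 2+k): the array is [1,1] followed by the
-- powers 2^1, …, 2^k, and sum = 2^(k+1).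
lemma loop_state (k : Nat) :
    (PySem.List.pyRange 2 (2 + (k : Int)) 1).foldl aStep ([1, 1], 2)
      = ([1, 1] ++ (List.range k).map (fun i => (2 : Int) ^ (i + 1)), 2 ^ (k + 1)) := by
  induction k with
  | zero => simp [PySem.List.pyRange_one_eq_nil]
  | succ k ih =>
    have hsplit : PySem.List.pyRange 2 (2 + ((k : Int) + 1)) 1
        = PySem.List.pyRange 2 (2 + (k : Int)) 1 ++ [2 + (k : Int)] := by
      have := PySem.List.pyRange_one_succ_right (a := 2) (b := 2 + (k : Int)) (by omega)
      rw [← this]; ring_nf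
    rw [show ((k + 1 : Nat) : Int) = (k : Int) + 1 by push_cast; ring, hsplit,
        List.foldl_append, ih]
    simp only [List.foldl_cons, List.foldl_nil, aStep]
    have hpre : ([1, 1] ++ (List.range k).map (fun i => (2 : Int) ^ (i + 1))).length = 2 + k := by
      simp; omega
    have hidx : (2 + (k : Int)) = ((([1, 1] ++ (List.range k).map (fun i => (2 : Int) ^ (i + 1))).length : Int)) := by
      rw [hpre]; push_cast; ring
    rw [Prod.mk.injEq]
    refine ⟨?_, ?_⟩
    · rw [List.range_succ]; simp
    · rw [hidx, PySem.List.pyGet?_append_length]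
      simp [Option.getD]
      ring

lemma array_alg_of_ge_three (n : Int) (h : 3 ≤ n) :
    Array_algorithm n = 2 ^ (n - 2).toNat := by
  set k := (n - 2).toNat with hk
  have hn : n = 2 + (k : Int) := by omega
  unfold Array_algorithm
  rw [hn, loop_state k]
  have hk1 : 1 ≤ k := by omega
  -- index (2 + k) - 1 = (length of [1,1] ++ first (k-1) powers)
  have hsplit : (List.range k).map (fun i => (2 : Int) ^ (i + 1))
      = (List.range (k - 1)).map (fun i => (2 : Int) ^ (i + 1)) ++ [2 ^ k] := by
    have : k = (k - 1) + 1 := by omega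
    conv_lhs => rw [this]
    rw [List.range_succ]
    simp
    omega
  have hpre : ((1 : Int) :: 1 :: (List.range (k - 1)).map (fun i => (2 : Int) ^ (i + 1))).length
      = k + 1 := by simp; omega
  have hidx : (2 + (k : Int) - 1)
      = ((((1 : Int) :: 1 :: (List.range (k - 1)).map (fun i => (2 : Int) ^ (i + 1))).length : Int)) := by
    rw [hpre]; push_cast; ring
  simp only [hsplit]
  have : ([1, 1] ++ ((List.range (k - 1)).map (fun i => (2 : Int) ^ (i + 1)) ++ [(2 : Int) ^ k]))
      = ((1 : Int) :: 1 :: (List.range (k - 1)).map (fun i => (2 : Int) ^ (i + 1))) ++ (2 : Int) ^ k :: [] := by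
    simp
  rw [this, hidx, PySem.List.pyGet?_append_length]
  rfl

-- ===== VERDICT (by name: the statement is the Claim_ definition above) =====
theorem Array_algorithm_spec : Claim_equal_Array_algorithm := by
  intro n _ hpre
  unfold Spec_Array_algorithm Array_algorithm_alt
  by_cases h3 : n < 3
  · have hpre' : -1 ≤ n := hpre
    rw [if_pos h3]
    interval_cases n <;> decide
  · rw [if_neg h3, array_alg_of_ge_three n (by omega)]
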